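-- pv_equiv track=rewrite | github.com/pypi-data/pypi-mirror-376 | packages/fastmarkdocs/fastmarkdocs-0.5.0-py3-none-any.whl/fastmarkdocs/scaffolder.py | _infer_section_from_function
-- ===== SOURCE A (Python) =====
-- from typing import Any, Optional, Union
--
-- def _infer_section_from_function(function_name: str) -> Optional[str]:
--     """Infer section name from function name patterns."""
--     function_name = function_name.lower()
--
--     # Function name patterns
--     if any(pattern in function_name for pattern in ["health", "ping", "alive"]):
--         return "Health"
--     elif any(pattern in function_name for pattern in ["metric", "stats", "monitor"]):
--         return "Metrics"
--     elif any(pattern in function_name for pattern in ["auth", "login", "logout", "token"]):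
--         return "Authentication"
--     elif any(pattern in function_name for pattern in ["session"]):
--         return "Session Management"
--     elif any(pattern in function_name for pattern in ["user", "account"]):
--         return "User Management"
--     elif any(pattern in function_name for pattern in ["setting", "config"]):
--         return "Settings"
--     elif any(pattern in function_name for pattern in ["cert", "ca", "certificate"]):
--         return "Certificate Authority"
--     elif any(pattern in function_name for pattern in ["key", "api_key"]):
--         return "API Keys"
--     elif any(pattern in function_name for pattern in ["node", "remote"]):
--         return "Node Management"
--     elif any(pattern in function_name for pattern in ["system", "status"]):
--         return "System"
--     elif any(pattern in function_name for pattern in ["log"]):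
--         return "Logs"
--     elif any(pattern in function_name for pattern in ["backup"]):
--         return "Backup"
--     elif any(pattern in function_name for pattern in ["restore"]):
--         return "Restore"
--     elif any(pattern in function_name for pattern in ["cluster"]):
--         return "Cluster Management"
--
--     return None
-- ===== SOURCE B (Python) =====
-- from typing import Optional
--
-- # Flat keyword -> (priority, section) map; B scans ALL keywords once and keeps
-- # the match with the lowest priority (min-by-priority accumulator), instead of
-- # an ordered first-match dispatch.
-- _KEYWORD_SECTIONS = {
--     "health": (0, "Health"), "ping": (0, "Health"), "alive": (0, "Health"),
--     "metric": (1, "Metrics"), "stats": (1, "Metrics"), "monitor": (1, "Metrics"),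
--     "auth": (2, "Authentication"), "login": (2, "Authentication"),
--     "logout": (2, "Authentication"), "token": (2, "Authentication"),
--     "session": (3, "Session Management"),
--     "user": (4, "User Management"), "account": (4, "User Management"),
--     "setting": (5, "Settings"), "config": (5, "Settings"),
--     "cert": (6, "Certificate Authority"), "ca": (6, "Certificate Authority"),
--     "certificate": (6, "Certificate Authority"),
--     "key": (7, "API Keys"), "api_key": (7, "API Keys"),
--     "node": (8, "Node Management"), "remote": (8, "Node Management"),
--     "system": (9, "System"), "status": (9, "System"),
--     "log": (10, "Logs"),
--     "backup": (11, "Backup"),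
--     "restore": (12, "Restore"),
--     "cluster": (13, "Cluster Management"),
-- }
--
-- def _infer_section_from_function(function_name: str) -> Optional[str]:
--     fn = function_name.lower()
--     best = None
--     for kw, (rank, section) in _KEYWORD_SECTIONS.items():
--         if kw in fn and (best is None or rank < best[0]):
--             best = (rank, section)
--     return None if best is None else best[1]
-- ===== Notes on version B (the rewrite author's own statement) =====
-- stated objective: alternative
-- what changed: The ordered fourteen-branch first-match elif dispatch is replaced by a flat keyword->(priority, section) map scanned in full once with a min-by-priority accumulator; correctness holds because priorities mirror the elif order and all keywords of one branch share one section.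
import Mathlib
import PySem

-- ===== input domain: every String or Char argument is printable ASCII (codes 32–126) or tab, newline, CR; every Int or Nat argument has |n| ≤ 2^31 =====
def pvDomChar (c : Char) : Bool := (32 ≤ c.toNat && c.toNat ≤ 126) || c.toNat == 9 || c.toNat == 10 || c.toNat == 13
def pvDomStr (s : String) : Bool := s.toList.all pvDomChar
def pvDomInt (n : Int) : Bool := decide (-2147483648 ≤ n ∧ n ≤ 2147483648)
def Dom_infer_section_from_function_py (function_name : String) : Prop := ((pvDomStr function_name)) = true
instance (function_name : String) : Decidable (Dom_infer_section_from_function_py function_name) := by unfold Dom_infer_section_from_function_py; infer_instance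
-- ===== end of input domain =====

-- B replaces the ordered first-match elif chain by a flat keyword→(priority, section) map
-- scanned in full with a min-by-priority accumulator (alternative algorithm, same cost).

-- ===== PORT A =====
def infer_section_from_function_py (function_name : String) : Option String :=
  let fn := PySem.Str.lower function_name
  if ["health", "ping", "alive"].any (fun p => PySem.Str.isIn p fn) then some "Health"
  else if ["metric", "stats", "monitor"].any (fun p => PySem.Str.isIn p fn) then some "Metrics"
  else if ["auth", "login", "logout", "token"].any (fun p => PySem.Str.isIn p fn) then some "Authentication"
  else if ["session"].any (fun p => PySem.Str.isIn p fn) then some "Session Management"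
  else if ["user", "account"].any (fun p => PySem.Str.isIn p fn) then some "User Management"
  else if ["setting", "config"].any (fun p => PySem.Str.isIn p fn) then some "Settings"
  else if ["cert", "ca", "certificate"].any (fun p => PySem.Str.isIn p fn) then some "Certificate Authority"
  else if ["key", "api_key"].any (fun p => PySem.Str.isIn p fn) then some "API Keys"
  else if ["node", "remote"].any (fun p => PySem.Str.isIn p fn) then some "Node Management"
  else if ["system", "status"].any (fun p => PySem.Str.isIn p fn) then some "System"
  else if ["log"].any (fun p => PySem.Str.isIn p fn) then some "Logs"
  else if ["backup"].any (fun p => PySem.Str.isIn p fn) then some "Backup"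
  else if ["restore"].any (fun p => PySem.Str.isIn p fn) then some "Restore"
  else if ["cluster"].any (fun p => PySem.Str.isIn p fn) then some "Cluster Management"
  else none

-- ===== PORT B =====
-- the flat keyword → (priority, section) table (dict iterated in insertion order)
def pvKeywordTable : List (String × Nat × String) :=
  [("health", 0, "Health"), ("ping", 0, "Health"), ("alive", 0, "Health"),
   ("metric", 1, "Metrics"), ("stats", 1, "Metrics"), ("monitor", 1, "Metrics"),
   ("auth", 2, "Authentication"), ("login", 2, "Authentication"),
   ("logout", 2, "Authentication"), ("token", 2, "Authentication"),
   ("session", 3, "Session Management"),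
   ("user", 4, "User Management"), ("account", 4, "User Management"),
   ("setting", 5, "Settings"), ("config", 5, "Settings"),
   ("cert", 6, "Certificate Authority"), ("ca", 6, "Certificate Authority"),
   ("certificate", 6, "Certificate Authority"),
   ("key", 7, "API Keys"), ("api_key", 7, "API Keys"),
   ("node", 8, "Node Management"), ("remote", 8, "Node Management"),
   ("system", 9, "System"), ("status", 9, "System"),
   ("log", 10, "Logs"),
   ("backup", 11, "Backup"),
   ("restore", 12, "Restore"),
   ("cluster", 13, "Cluster Management")]

-- loop body: `if kw in fn and (best is None or rank < best[0]): best = (rank, section)`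
def pvBestStep (fn : String) (best : Option (Nat × String)) (e : String × Nat × String) : Option (Nat × String) :=
  if PySem.Str.isIn e.1 fn && (match best with | none => true | some b => decide (e.2.1 < b.1)) then
    some e.2
  else best

-- `return None if best is None else best[1]`
def pvFinish (best : Option (Nat × String)) : Option String :=
  match best with
  | none => none
  | some b => some b.2

def infer_section_from_function_py_alt (function_name : String) : Option String :=
  let fn := PySem.Str.lower function_name
  let best := pvKeywordTable.foldl (pvBestStep fn) none
  pvFinish best

-- ===== PRECONDITION & SPEC =====
def Spec_infer_section_from_function_py (function_name : String) (out : Option String) : Prop := out = infer_section_from_function_py_alt function_name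
instance (function_name : String) (out : Option String) : Decidable (Spec_infer_section_from_function_py function_name out) := by unfold Spec_infer_section_from_function_py; infer_instance

-- ===== CLAIM (what is proved, stated in full; the proofs are below) =====
def Claim_equal_infer_section_from_function_py : Prop := ∀ (function_name : String), Dom_infer_section_from_function_py function_name → Spec_infer_section_from_function_py function_name (infer_section_from_function_py function_name)

-- ===== LEMMAS AND PROOFS =====

-- the table, regrouped by priority (proof-side view of pvKeywordTable)
def pvGroups : List (List String × Nat × String) :=
  [(["health", "ping", "alive"], 0, "Health"),
   (["metric", "stats", "monitor"], 1, "Metrics"),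
   (["auth", "login", "logout", "token"], 2, "Authentication"),
   (["session"], 3, "Session Management"),
   (["user", "account"], 4, "User Management"),
   (["setting", "config"], 5, "Settings"),
   (["cert", "ca", "certificate"], 6, "Certificate Authority"),
   (["key", "api_key"], 7, "API Keys"),
   (["node", "remote"], 8, "Node Management"),
   (["system", "status"], 9, "System"),
   (["log"], 10, "Logs"),
   (["backup"], 11, "Backup"),
   (["restore"], 12, "Restore"),
   (["cluster"], 13, "Cluster Management")]

def pvFlat (g : List String × Nat × String) : List (String × Nat × String) :=
  g.1.map (fun k => (k, g.2.1, g.2.2))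

lemma pvKeywordTable_eq : pvKeywordTable = pvGroups.flatMap pvFlat := by decide

lemma pvGroups_sorted : pvGroups.Pairwise (fun a b => a.2.1 ≤ b.2.1) := by decide

-- once best is set at rank r, later entries of rank ≥ r never replace it
lemma pv_fold_absorb (fn : String) (r : Nat) (s : String) :
    ∀ (L : List (String × Nat × String)), (∀ e ∈ L, r ≤ e.2.1) →
    L.foldl (pvBestStep fn) (some (r, s)) = some (r, s) := by
  intro L
  induction L with
  | nil => intro _; rfl
  | cons e L ih =>
    intro h
    have hr : r ≤ e.2.1 := h e (List.mem_cons_self ..)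
    have : pvBestStep fn (some (r, s)) e = some (r, s) := by
      unfold pvBestStep
      rw [if_neg]
      simp [Nat.not_lt.mpr hr]
    simp only [List.foldl_cons, this]
    exact ih (fun e' he' => h e' (List.mem_cons_of_mem _ he'))

-- a group none of whose keywords occurs leaves the accumulator unchanged
lemma pv_fold_group_none (fn : String) (r : Nat) (s : String) :
    ∀ (ks : List String) (acc : Option (Nat × String)),
    ks.any (fun p => PySem.Str.isIn p fn) = false →
    ((ks.map (fun k => (k, r, s))).foldl (pvBestStep fn) acc) = acc := by
  intro ks
  induction ks with
  | nil => intro _ _; rfl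
  | cons k ks ih =>
    intro acc h
    simp only [List.any_cons, Bool.or_eq_false_iff] at h
    simp only [List.map_cons, List.foldl_cons]
    rw [show pvBestStep fn acc (k, r, s) = acc by
      unfold pvBestStep; simp only [h.1, Bool.false_and, Bool.false_eq_true, if_false]]
    exact ih acc h.2

-- a group with a matching keyword, starting from none, sets best to (r, s)
lemma pv_fold_group_match (fn : String) (r : Nat) (s : String) :
    ∀ (ks : List String),
    ks.any (fun p => PySem.Str.isIn p fn) = true →
    ((ks.map (fun k => (k, r, s))).foldl (pvBestStep fn) none) = some (r, s) := by
  intro ks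
  induction ks with
  | nil => intro h; simp at h
  | cons k ks ih =>
    intro h
    simp only [List.map_cons, List.foldl_cons]
    cases hk : PySem.Str.isIn k fn with
    | true =>
      rw [show pvBestStep fn none (k, r, s) = some (r, s) by
        unfold pvBestStep; simp only [hk, Bool.true_and]; rfl]
      apply pv_fold_absorb
      intro e he
      simp only [List.mem_map] at he
      obtain ⟨k', _, rfl⟩ := he
      exact le_refl r
    | false =>
      rw [show pvBestStep fn none (k, r, s) = none by
        unfold pvBestStep; simp only [hk, Bool.false_and, Bool.false_eq_true, if_false]]
      apply ih
      simp only [List.any_cons, hk, Bool.false_or] at h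
      exact h

lemma find?_cons_if {α : Type} (p : α → Bool) (a : α) (l : List α) :
    List.find? p (a :: l) = if p a then some a else List.find? p l := by
  cases h : p a <;> simp [h]

-- main invariant: the min-by-priority fold over the flattened groups equals
-- the first-match scan over the groups, provided ranks are nondecreasing
lemma pv_fold_flat (fn : String) :
    ∀ (G : List (List String × Nat × String)),
    G.Pairwise (fun a b => a.2.1 ≤ b.2.1) →
    ((G.flatMap pvFlat).foldl (pvBestStep fn) none)
      = (G.find? (fun g => g.1.any (fun p => PySem.Str.isIn p fn))).map (fun g => g.2) := by
  intro G
  induction G with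
  | nil => intro _; rfl
  | cons g G ih =>
    intro hp
    rw [List.pairwise_cons] at hp
    simp only [List.flatMap_cons, List.foldl_append]
    cases hA : g.1.any (fun p => PySem.Str.isIn p fn) with
    | true =>
      rw [show pvFlat g = g.1.map (fun k => (k, g.2.1, g.2.2)) from rfl,
          pv_fold_group_match fn g.2.1 g.2.2 g.1 hA]
      rw [pv_fold_absorb fn g.2.1 g.2.2 _ ?later]
      · simp only [find?_cons_if, hA, if_true]
        rfl
      case later =>
        intro e he
        simp only [List.mem_flatMap, pvFlat, List.mem_map] at he
        obtain ⟨g', hg', k', _, rfl⟩ := he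
        exact hp.1 g' hg'
    | false =>
      rw [show pvFlat g = g.1.map (fun k => (k, g.2.1, g.2.2)) from rfl,
          pv_fold_group_none fn g.2.1 g.2.2 g.1 none hA]
      simp only [find?_cons_if, hA]
      rw [if_neg (by simp)]
      exact ih hp.2

set_option maxHeartbeats 1000000 in
-- ===== VERDICT (by name: the statement is the Claim_ definition above) =====
-- the group scan, evaluated on the concrete table
lemma pv_findGroups (f : String) :
    (pvGroups.find? (fun g => g.1.any (fun p => PySem.Str.isIn p f))).map (fun g => g.2)
    = (if (["health", "ping", "alive"].any fun p => PySem.Str.isIn p f) then some ((0 : Nat), "Health")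
      else if (["metric", "stats", "monitor"].any fun p => PySem.Str.isIn p f) then some (1, "Metrics")
      else if (["auth", "login", "logout", "token"].any fun p => PySem.Str.isIn p f) then some (2, "Authentication")
      else if (["session"].any fun p => PySem.Str.isIn p f) then some (3, "Session Management")
      else if (["user", "account"].any fun p => PySem.Str.isIn p f) then some (4, "User Management")
      else if (["setting", "config"].any fun p => PySem.Str.isIn p f) then some (5, "Settings")
      else if (["cert", "ca", "certificate"].any fun p => PySem.Str.isIn p f) then some (6, "Certificate Authority")
      else if (["key", "api_key"].any fun p => PySem.Str.isIn p f) then some (7, "API Keys")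
      else if (["node", "remote"].any fun p => PySem.Str.isIn p f) then some (8, "Node Management")
      else if (["system", "status"].any fun p => PySem.Str.isIn p f) then some (9, "System")
      else if (["log"].any fun p => PySem.Str.isIn p f) then some (10, "Logs")
      else if (["backup"].any fun p => PySem.Str.isIn p f) then some (11, "Backup")
      else if (["restore"].any fun p => PySem.Str.isIn p f) then some (12, "Restore")
      else if (["cluster"].any fun p => PySem.Str.isIn p f) then some (13, "Cluster Management")
      else none) := by
  unfold pvGroups
  simp only [find?_cons_if, List.find?_nil]
  repeat rw [apply_ite (Option.map (fun g : List String × Nat × String => g.2))]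
  rfl

theorem infer_section_from_function_py_spec : Claim_equal_infer_section_from_function_py := by
  intro fn _
  unfold Spec_infer_section_from_function_py infer_section_from_function_py infer_section_from_function_py_alt
  simp only [pvKeywordTable_eq]
  rw [pv_fold_flat (PySem.Str.lower fn) pvGroups pvGroups_sorted, pv_findGroups]
  repeat rw [apply_ite pvFinish]
  rfl
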